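-- pv_equiv track=rewrite | github.com/mitrov96/AdventOfCode2022 | day_15.py | set_grid
-- ===== SOURCE A (Python) =====
-- def set_grid(data, target_y=10):
--     grid = set()
--     sensors = set()
--     beacons = set()
--     for line in data:
--         sensor, beacon = line
--         sensors.add(sensor)
--         beacons.add(beacon)
--
--     for line in data:
--         sensor, beacon = line
--         radius = abs(sensor[0] - beacon[0]) + abs(sensor[1] - beacon[1])
--         arm = radius - abs(sensor[1] - target_y)
--         if arm <= 0:
--             continue  # cannot reach target_y
--         for x in range(sensor[0] - arm, sensor[0] + arm):
--             grid.add(x)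
--
--     return grid
-- ===== SOURCE B (Python) =====
-- def _gaps(covered, cur, hi):
--     # x's in [cur, hi] not covered by any interval in `covered`
--     # (covered is sorted, disjoint, non-adjacent), in increasing order
--     xs = []
--     for a, b in covered:
--         if cur > hi:
--             break
--         if b < cur:
--             continue
--         if cur < a:
--             xs.extend(range(cur, min(a, hi + 1)))
--         cur = max(cur, b + 1)
--     if cur <= hi:
--         xs.extend(range(cur, hi + 1))
--     return xs
--
--
-- def _merge(covered, lo, hi):
--     # insert closed interval [lo, hi] into the sorted disjoint non-adjacent list
--     if not covered:
--         return [(lo, hi)]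
--     (a, b), rest = covered[0], covered[1:]
--     if b < lo - 1:
--         return [(a, b)] + _merge(rest, lo, hi)
--     if hi + 1 < a:
--         return [(lo, hi)] + covered
--     return _merge(rest, min(lo, a), max(hi, b))
--
--
-- def set_grid(data, target_y=10):
--     covered = []  # sorted, disjoint, non-adjacent closed intervals
--     out = []      # covered x's in first-appearance order
--     for (sx, sy), (bx, by) in data:
--         arm = abs(sx - bx) + abs(sy - by) - abs(sy - target_y)
--         if arm <= 0:
--             continue
--         lo, hi = sx - arm, sx + arm - 1
--         out.extend(_gaps(covered, lo, hi))
--         covered = _merge(covered, lo, hi)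
--     return set(out)
-- ===== Notes on version B (the rewrite author's own statement) =====
-- stated objective: alternative
-- what changed: Replaces the per-x set membership loop (and the unused sensors/beacons sets) with a maintained sorted list of disjoint merged intervals: each sensor's row-slice is intersected with the coverage intervals to emit only the genuinely new x's, then merged into the interval list.
import Mathlib
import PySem

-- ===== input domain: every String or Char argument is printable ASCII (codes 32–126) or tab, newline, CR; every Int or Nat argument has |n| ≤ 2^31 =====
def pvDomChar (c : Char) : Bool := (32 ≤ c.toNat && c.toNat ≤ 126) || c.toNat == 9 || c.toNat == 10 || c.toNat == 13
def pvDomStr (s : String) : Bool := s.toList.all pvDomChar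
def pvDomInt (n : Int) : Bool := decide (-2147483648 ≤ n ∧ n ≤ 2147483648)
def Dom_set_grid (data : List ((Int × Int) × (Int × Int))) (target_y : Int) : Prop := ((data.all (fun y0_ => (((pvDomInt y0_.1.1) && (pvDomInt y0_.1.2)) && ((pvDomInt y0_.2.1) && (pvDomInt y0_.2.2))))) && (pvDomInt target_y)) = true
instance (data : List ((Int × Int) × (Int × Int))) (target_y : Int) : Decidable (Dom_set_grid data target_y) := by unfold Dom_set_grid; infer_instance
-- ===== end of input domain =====

-- B replaces A's per-x set-membership loop (and the unused sensors/beacons sets) with a sorted list of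
-- disjoint merged coverage intervals, emitting only the x's not covered so far; same returned set.


-- ===== PORT A =====
def set_grid (data : List ((Int × Int) × (Int × Int))) (target_y : Int) : List Int :=
  -- grid = set(); sensors = set(); beacons = set(); first loop fills sensors/beacons (unused)
  let _sb : PySem.Set (Int × Int) × PySem.Set (Int × Int) :=
    data.foldl (fun p line => (PySem.Set.add p.1 line.1, PySem.Set.add p.2 line.2))
      (PySem.Set.empty, PySem.Set.empty)
  -- second loop: for each line, add range(sensor_x - arm, sensor_x + arm) to grid
  data.foldl (fun grid line =>
    let radius := |line.1.1 - line.2.1| + |line.1.2 - line.2.2|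
    let arm := radius - |line.1.2 - target_y|
    if arm ≤ 0 then grid
    else (PySem.List.pyRange (line.1.1 - arm) (line.1.1 + arm) 1).foldl PySem.Set.add grid)
    PySem.Set.empty

-- ===== PORT B =====
-- _gaps(covered, cur, hi): x's in [cur, hi] not covered, increasing (loop → structural recursion;
-- the `break` when cur > hi also skips the trailing extend, hence the bare `[]`)
def gapsB : List (Int × Int) → Int → Int → List Int
  | [], cur, hi => if cur ≤ hi then PySem.List.pyRange cur (hi + 1) 1 else []
  | (a, b) :: rest, cur, hi =>
    if hi < cur then []
    else if b < cur then gapsB rest cur hi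
    else (if cur < a then PySem.List.pyRange cur (min a (hi + 1)) 1 else []) ++
         gapsB rest (max cur (b + 1)) hi

-- _merge(covered, lo, hi)
def mergeB : List (Int × Int) → Int → Int → List (Int × Int)
  | [], lo, hi => [(lo, hi)]
  | (a, b) :: rest, lo, hi =>
    if b < lo - 1 then (a, b) :: mergeB rest lo hi
    else if hi + 1 < a then (lo, hi) :: (a, b) :: rest
    else mergeB rest (min lo a) (max hi b)

def set_grid_alt (data : List ((Int × Int) × (Int × Int))) (target_y : Int) : List Int :=
  let st :=
    data.foldl (fun (st : List (Int × Int) × List Int) line =>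
      let arm := |line.1.1 - line.2.1| + |line.1.2 - line.2.2| - |line.1.2 - target_y|
      if arm ≤ 0 then st
      else
        let lo := line.1.1 - arm
        let hi := line.1.1 + arm - 1
        (mergeB st.1 lo hi, st.2 ++ gapsB st.1 lo hi))
      ([], [])
  PySem.Set.ofList st.2

-- ===== PRECONDITION & SPEC =====
def Spec_set_grid (data : List ((Int × Int) × (Int × Int))) (target_y : Int) (out : List Int) : Prop := out = set_grid_alt data target_y
instance (data : List ((Int × Int) × (Int × Int))) (target_y : Int) (out : List Int) : Decidable (Spec_set_grid data target_y out) := by unfold Spec_set_grid; infer_instance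

-- ===== CLAIM (what is proved, stated in full; the proofs are below) =====
def Claim_equal_set_grid : Prop := ∀ (data : List ((Int × Int) × (Int × Int))) (target_y : Int), Dom_set_grid data target_y → Spec_set_grid data target_y (set_grid data target_y)

-- ===== LEMMAS AND PROOFS =====

-- `covered` invariant: sorted, pairwise disjoint and non-adjacent, each interval non-empty
def InvCov (cov : List (Int × Int)) : Prop :=
  cov.Pairwise (fun p q => p.2 + 1 < q.1) ∧ ∀ p ∈ cov, p.1 ≤ p.2

-- x is covered by some interval of cov
def coversB (cov : List (Int × Int)) (x : Int) : Bool :=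
  cov.any (fun p => decide (p.1 ≤ x) && decide (x ≤ p.2))

theorem gapsB_eq (cov : List (Int × Int)) (cur hi : Int) (hinv : InvCov cov) :
    gapsB cov cur hi =
      (PySem.List.pyRange cur (hi + 1) 1).filter (fun x => !coversB cov x) := by
  induction cov generalizing cur with
  | nil =>
    simp only [gapsB, coversB, List.any_nil, Bool.not_false, List.filter_true]
    split_ifs with h
    · rfl
    · rw [PySem.List.pyRange_one_eq_nil (by omega)]
  | cons p rest ih =>
    obtain ⟨a, b⟩ := p
    obtain ⟨hpw, hbd⟩ := hinv
    have hab : a ≤ b := hbd (a, b) (List.mem_cons_self ..)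
    have hsep : ∀ q ∈ rest, b + 1 < q.1 := fun q hq => (List.pairwise_cons.mp hpw).1 q hq
    have hinv' : InvCov rest := ⟨(List.pairwise_cons.mp hpw).2, fun p hp => hbd p (List.mem_cons_of_mem _ hp)⟩
    -- on x ≥ b + 1 the head interval never covers, so the head can be dropped from the filter
    have hdrop : ∀ s : Int, b + 1 ≤ s →
        (PySem.List.pyRange s (hi + 1) 1).filter (fun x => !coversB ((a, b) :: rest) x) =
        (PySem.List.pyRange s (hi + 1) 1).filter (fun x => !coversB rest x) := by
      intro s hs
      apply List.filter_congr
      intro x hx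
      rw [PySem.List.mem_pyRange_one] at hx
      simp only [coversB, List.any_cons]
      have : (decide (a ≤ x) && decide (x ≤ b)) = false := by
        simp only [Bool.and_eq_false_iff, decide_eq_false_iff_not]; omega
      rw [this, Bool.false_or]
    -- on x < a no interval of (a,b)::rest covers
    have hkeep : ∀ s e : Int, e ≤ a →
        (PySem.List.pyRange s e 1).filter (fun x => !coversB ((a, b) :: rest) x) =
        PySem.List.pyRange s e 1 := by
      intro s e he
      apply List.filter_eq_self.mpr
      intro x hx
      rw [PySem.List.mem_pyRange_one] at hx
      simp only [coversB, List.any_cons, Bool.not_eq_eq_eq_not, Bool.not_true, Bool.or_eq_false_iff,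
        Bool.and_eq_false_iff, decide_eq_false_iff_not, List.any_eq_false]
      constructor
      · omega
      · intro p hp
        have h1 := hsep p hp
        simp only [Bool.and_eq_true, decide_eq_true_eq]
        omega
    simp only [gapsB]
    split_ifs with h1 h2 h3
    · -- break: cur > hi, range empty
      rw [PySem.List.pyRange_one_eq_nil (by omega)]; simp
    · -- b < cur: head interval irrelevant
      rw [ih cur hinv', hdrop cur (by omega)]
    · -- gap before a: cur < a, cur ≤ hi, cur ≤ b
      have hm : cur ≤ min a (hi + 1) := by omega
      have hm2 : min a (hi + 1) ≤ hi + 1 := by omega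
      rw [PySem.List.pyRange_one_append cur (min a (hi + 1)) (hi + 1) hm hm2]
      rw [List.filter_append, hkeep cur (min a (hi + 1)) (by omega)]
      congr 1
      have hmax : max cur (b + 1) = b + 1 := by omega
      rw [hmax, ih (b + 1) hinv']
      by_cases hb : b + 1 ≤ hi + 1
      · rw [PySem.List.pyRange_one_append (min a (hi + 1)) (b + 1) (hi + 1) (by omega) hb,
          List.filter_append, hdrop (b + 1) (by omega)]
        have : (PySem.List.pyRange (min a (hi + 1)) (b + 1) 1).filter
            (fun x => !coversB ((a, b) :: rest) x) = [] := by
          apply List.filter_eq_nil_iff.mpr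
          intro x hx
          rw [PySem.List.mem_pyRange_one] at hx
          simp only [coversB, List.any_cons, Bool.not_eq_eq_eq_not, Bool.not_true,
            Bool.or_eq_false_iff, Bool.and_eq_false_iff, decide_eq_false_iff_not]
          intro hcontra
          omega
        rw [this, List.nil_append]
      · -- b ≥ hi + 1 : everything from min a (hi+1) on is covered by [a,b]
        rw [PySem.List.pyRange_one_eq_nil (show hi + 1 ≤ b + 1 by omega)]
        apply Eq.symm
        apply List.filter_eq_nil_iff.mpr
        intro x hx
        rw [PySem.List.mem_pyRange_one] at hx
        simp only [coversB, List.any_cons, Bool.not_eq_eq_eq_not, Bool.not_true,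
          Bool.or_eq_false_iff, Bool.and_eq_false_iff, decide_eq_false_iff_not]
        intro hcontra
        omega
    · -- a ≤ cur ≤ b : whole prefix covered
      simp only [List.nil_append]
      have hmax : max cur (b + 1) = b + 1 := by omega
      rw [hmax, ih (b + 1) hinv']
      by_cases hb : b + 1 ≤ hi + 1
      · rw [PySem.List.pyRange_one_append cur (b + 1) (hi + 1) (by omega) hb,
          List.filter_append, hdrop (b + 1) (by omega)]
        have : (PySem.List.pyRange cur (b + 1) 1).filter
            (fun x => !coversB ((a, b) :: rest) x) = [] := by
          apply List.filter_eq_nil_iff.mpr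
          intro x hx
          rw [PySem.List.mem_pyRange_one] at hx
          simp only [coversB, List.any_cons, Bool.not_eq_eq_eq_not, Bool.not_true,
            Bool.or_eq_false_iff, Bool.and_eq_false_iff, decide_eq_false_iff_not]
          intro hcontra
          omega
        rw [this, List.nil_append]
      · rw [PySem.List.pyRange_one_eq_nil (show hi + 1 ≤ b + 1 by omega)]
        apply Eq.symm
        apply List.filter_eq_nil_iff.mpr
        intro x hx
        rw [PySem.List.mem_pyRange_one] at hx
        simp only [coversB, List.any_cons, Bool.not_eq_eq_eq_not, Bool.not_true,
          Bool.or_eq_false_iff, Bool.and_eq_false_iff, decide_eq_false_iff_not]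
        intro hcontra
        omega

theorem mergeB_fst_lb (cov : List (Int × Int)) (lo hi c : Int)
    (hall : ∀ p ∈ cov, c < p.1) (hlo : c < lo) :
    ∀ q ∈ mergeB cov lo hi, c < q.1 := by
  induction cov generalizing lo hi with
  | nil =>
    intro q hq; simp only [mergeB, List.mem_singleton] at hq; subst hq; exact hlo
  | cons p rest ih =>
    obtain ⟨a, b⟩ := p
    intro q hq
    simp only [mergeB] at hq
    split_ifs at hq with h1 h2
    · rcases List.mem_cons.mp hq with h | h
      · subst h; exact hall (a, b) (List.mem_cons_self ..)
      · exact ih lo hi (fun p hp => hall p (List.mem_cons_of_mem _ hp)) hlo q h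
    · rcases List.mem_cons.mp hq with h | h
      · subst h; exact hlo
      · exact hall q h
    · have ha : c < a := hall (a, b) (List.mem_cons_self ..)
      exact ih (min lo a) (max hi b) (fun p hp => hall p (List.mem_cons_of_mem _ hp)) (by omega) q hq

theorem mergeB_inv (cov : List (Int × Int)) (lo hi : Int) (hinv : InvCov cov) (hlh : lo ≤ hi) :
    InvCov (mergeB cov lo hi) := by
  induction cov generalizing lo hi with
  | nil =>
    simp only [mergeB]
    exact ⟨List.pairwise_singleton _ _, by intro p hp; simp at hp; subst hp; exact hlh⟩
  | cons p rest ih =>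
    obtain ⟨a, b⟩ := p
    obtain ⟨hpw, hbd⟩ := hinv
    have hsep : ∀ q ∈ rest, b + 1 < q.1 := fun q hq => (List.pairwise_cons.mp hpw).1 q hq
    have hab : a ≤ b := hbd (a, b) (List.mem_cons_self ..)
    have hinv' : InvCov rest := ⟨(List.pairwise_cons.mp hpw).2, fun p hp => hbd p (List.mem_cons_of_mem _ hp)⟩
    simp only [mergeB]
    split_ifs with h1 h2
    · obtain ⟨ipw, ibd⟩ := ih lo hi hinv' hlh
      refine ⟨List.pairwise_cons.mpr ⟨?_, ipw⟩, ?_⟩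
      · exact fun q hq => mergeB_fst_lb rest lo hi (b + 1) (fun p hp => hsep p hp) (by omega) q hq
      · intro p hp
        rcases List.mem_cons.mp hp with h | h
        · subst h; exact hab
        · exact ibd p h
    · refine ⟨List.pairwise_cons.mpr ⟨?_, hpw⟩, ?_⟩
      · intro q hq
        rcases List.mem_cons.mp hq with h | h
        · subst h; exact h2
        · have := hsep q h; omega
      · intro p hp
        rcases List.mem_cons.mp hp with h | h
        · subst h; exact hlh
        · exact hbd p h
    · exact ih (min lo a) (max hi b) hinv' (by omega)

theorem mergeB_covers (cov : List (Int × Int)) (lo hi x : Int) (hinv : InvCov cov) (hlh : lo ≤ hi) :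
    (coversB (mergeB cov lo hi) x = true) ↔
      (coversB cov x = true ∨ (lo ≤ x ∧ x ≤ hi)) := by
  induction cov generalizing lo hi with
  | nil => simp [mergeB, coversB]
  | cons p rest ih =>
    obtain ⟨a, b⟩ := p
    obtain ⟨hpw, hbd⟩ := hinv
    have hab : a ≤ b := hbd (a, b) (List.mem_cons_self ..)
    have hinv' : InvCov rest := ⟨(List.pairwise_cons.mp hpw).2, fun p hp => hbd p (List.mem_cons_of_mem _ hp)⟩
    simp only [mergeB]
    split_ifs with h1 h2
    · have := ih lo hi hinv' hlh
      simp only [coversB, List.any_cons, Bool.or_eq_true] at this ⊢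
      tauto
    · simp only [coversB, List.any_cons, Bool.or_eq_true, Bool.and_eq_true, decide_eq_true_eq]
      by_cases hr : (rest.any fun p => decide (p.1 ≤ x) && decide (x ≤ p.2)) = true
      · simp [hr]
      · simp [hr]; omega
    · rw [ih (min lo a) (max hi b) hinv' (by omega)]
      simp only [coversB, List.any_cons, Bool.or_eq_true, Bool.and_eq_true, decide_eq_true_eq]
      by_cases hr : (rest.any fun p => decide (p.1 ≤ x) && decide (x ≤ p.2)) = true
      · simp [hr]
      · simp [hr]; omega

-- one A-step equals appending the gaps
theorem stepA_eq (g : List Int) (cov : List (Int × Int)) (lo hi : Int)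
    (hmem : ∀ x, x ∈ g ↔ coversB cov x = true) (hinv : InvCov cov) :
    (PySem.List.pyRange lo (hi + 1) 1).foldl PySem.Set.add g = g ++ gapsB cov lo hi := by
  have h1 : (PySem.List.pyRange lo (hi + 1) 1).foldl PySem.Set.add g =
      PySem.Set.update g (PySem.List.pyRange lo (hi + 1) 1) := rfl
  rw [h1, PySem.Set.update_eq_append_filter,
    PySem.Set.ofList_eq_self_of_nodup _ (PySem.List.nodup_pyRange_one lo (hi + 1)),
    gapsB_eq cov lo hi hinv]
  congr 1
  apply List.filter_congr
  intro x _
  have : PySem.Set.contains g x = coversB cov x := by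
    by_cases hx : x ∈ g
    · rw [(PySem.Set.contains_iff g x).mpr hx, ((hmem x).mp hx).symm]
    · have h2 : ¬ coversB cov x = true := fun hc => hx ((hmem x).mpr hc)
      rw [Bool.not_eq_true] at h2
      rw [h2]
      rw [show PySem.Set.contains g x = false by
        rw [← Bool.not_eq_true]; exact fun hc => hx ((PySem.Set.contains_iff g x).mp hc)]
  rw [this]

theorem main_inv (data : List ((Int × Int) × (Int × Int))) (target_y : Int)
    (g : List Int) (cov : List (Int × Int))
    (hmem : ∀ x, x ∈ g ↔ coversB cov x = true) (hinv : InvCov cov) (hnd : g.Nodup) :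
    let g' := data.foldl (fun grid line =>
      let radius := |line.1.1 - line.2.1| + |line.1.2 - line.2.2|
      let arm := radius - |line.1.2 - target_y|
      if arm ≤ 0 then grid
      else (PySem.List.pyRange (line.1.1 - arm) (line.1.1 + arm) 1).foldl PySem.Set.add grid) g
    let st := data.foldl (fun (st : List (Int × Int) × List Int) line =>
      let arm := |line.1.1 - line.2.1| + |line.1.2 - line.2.2| - |line.1.2 - target_y|
      if arm ≤ 0 then st
      else
        let lo := line.1.1 - arm
        let hi := line.1.1 + arm - 1
        (mergeB st.1 lo hi, st.2 ++ gapsB st.1 lo hi)) (cov, g)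
    st.2 = g' ∧ (∀ x, x ∈ g' ↔ coversB st.1 x = true) ∧ InvCov st.1 ∧ g'.Nodup := by
  induction data generalizing g cov with
  | nil => exact ⟨rfl, hmem, hinv, hnd⟩
  | cons line rest ih =>
    simp only [List.foldl_cons]
    by_cases h : |line.1.1 - line.2.1| + |line.1.2 - line.2.2| - |line.1.2 - target_y| ≤ 0
    · rw [if_pos h, if_pos h]
      exact ih g cov hmem hinv hnd
    · rw [if_neg h, if_neg h]
      set arm := |line.1.1 - line.2.1| + |line.1.2 - line.2.2| - |line.1.2 - target_y| with harm
      set lo := line.1.1 - arm with hlo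
      have hsplit : line.1.1 + arm = (line.1.1 + arm - 1) + 1 := by omega
      set hi := line.1.1 + arm - 1 with hhi
      have hlh : lo ≤ hi := by omega
      rw [hsplit, stepA_eq g cov lo hi hmem hinv]
      have hmem' : ∀ x, x ∈ g ++ gapsB cov lo hi ↔ coversB (mergeB cov lo hi) x = true := by
        intro x
        rw [List.mem_append, mergeB_covers cov lo hi x hinv hlh, gapsB_eq cov lo hi hinv,
          List.mem_filter, PySem.List.mem_pyRange_one, hmem x]
        by_cases hc : coversB cov x = true
        · simp [hc]
        · simp only [Bool.not_eq_true] at hc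
          simp [hc]
      have hgapsnd : (gapsB cov lo hi).Nodup := by
        rw [gapsB_eq cov lo hi hinv]
        exact (PySem.List.nodup_pyRange_one lo (hi + 1)).filter _
      have hnd' : (g ++ gapsB cov lo hi).Nodup := by
        refine List.Nodup.append hnd hgapsnd (List.disjoint_left.mpr ?_)
        intro x hxg hxgap
        rw [gapsB_eq cov lo hi hinv, List.mem_filter] at hxgap
        have := (hmem x).mp hxg
        simp [this] at hxgap
      exact ih (g ++ gapsB cov lo hi) (mergeB cov lo hi) hmem' (mergeB_inv cov lo hi hinv hlh) hnd' 

-- ===== VERDICT (by name: the statement is the Claim_ definition above) =====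
theorem set_grid_spec : Claim_equal_set_grid := by
  intro data target_y _
  unfold Spec_set_grid set_grid set_grid_alt
  have h := main_inv data target_y [] []
    (by intro x; simp [coversB]) ⟨List.Pairwise.nil, by simp⟩ List.nodup_nil
  dsimp only at h ⊢
  obtain ⟨h1, _, _, h4⟩ := h
  rw [h1, PySem.Set.ofList_eq_self_of_nodup _ h4]
  rfl
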